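-- pv_equiv track=rewrite | github.com/haolunc/ARC-RL | reference_solutions/solutions/78e78cff.py | transform
-- ===== SOURCE A (Python) =====
-- def transform(grid):
--
--     h = len(grid)
--     w = len(grid[0]) if h else 0
--
--     out = [row[:] for row in grid]
--
--     from collections import Counter, defaultdict
--     cnt = Counter()
--     coords = defaultdict(list)
--     for r in range(h):
--         for c in range(w):
--             col = grid[r][c]
--             cnt[col] += 1
--             coords[col].append((r, c))
--
--     if not cnt:
--         return out
--
--     background = max(cnt.items(), key=lambda x: x[1])[0]
--
--     non_bg = [col for col in cnt.keys() if col != background]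
--     if not non_bg:
--         return out
--
--     seed = min(non_bg, key=lambda x: cnt[x])
--
--     others = [col for col in non_bg if col != seed]
--     if not others:
--         return out
--     A = max(others, key=lambda x: cnt[x])
--
--     a_positions = coords[A]
--     rows = [r for r, c in a_positions]
--     cols = [c for r, c in a_positions]
--     min_r, max_r = min(rows), max(rows)
--     min_c, max_c = min(cols), max(cols)
--
--     seed_pos = coords[seed][0]
--     seed_r, seed_c = seed_pos
--
--     def isA(r, c):
--         return grid[r][c] == A
--
--     for r in range(min_r, max_r + 1):
--
--         left = -1
--         for c in range(seed_c, -1, -1):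
--             if isA(r, c):
--                 left = c
--                 break
--
--         right = w
--         for c in range(seed_c, w):
--             if isA(r, c):
--                 right = c
--                 break
--
--         for c in range(left + 1, right):
--             if grid[r][c] != A:
--                 out[r][c] = seed
--
--     for c in range(min_c, max_c + 1):
--
--         top = -1
--         for r in range(seed_r, -1, -1):
--             if isA(r, c):
--                 top = r
--                 break
--
--         bottom = h
--         for r in range(seed_r, h):
--             if isA(r, c):
--                 bottom = r
--                 break
--
--         for r in range(top + 1, bottom):
--             if grid[r][c] != A:
--                 out[r][c] = seed
--
--     return out
-- ===== SOURCE B (Python) =====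
-- def transform(grid):
--     h = len(grid)
--     w = len(grid[0]) if h else 0
--
--     # classification (identical tie-breaking to the original)
--     cnt = {}
--     coords = {}
--     for r in range(h):
--         for c in range(w):
--             v = grid[r][c]
--             cnt[v] = cnt.get(v, 0) + 1
--             coords.setdefault(v, []).append((r, c))
--
--     if not cnt:
--         return [row[:] for row in grid]
--     background = max(cnt.items(), key=lambda x: x[1])[0]
--     non_bg = [v for v in cnt.keys() if v != background]
--     if not non_bg:
--         return [row[:] for row in grid]
--     seed = min(non_bg, key=lambda v: cnt[v])
--     others = [v for v in non_bg if v != seed]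
--     if not others:
--         return [row[:] for row in grid]
--     A = max(others, key=lambda v: cnt[v])
--
--     a_positions = coords[A]
--     min_r = min(r for r, _ in a_positions)
--     max_r = max(r for r, _ in a_positions)
--     min_c = min(c for _, c in a_positions)
--     max_c = max(c for _, c in a_positions)
--     seed_r, seed_c = coords[seed][0]
--
--     # index A's positions by row and by column
--     rows_of = {}
--     cols_of = {}
--     for (r, c) in a_positions:
--         rows_of.setdefault(r, []).append(c)
--         cols_of.setdefault(c, []).append(r)
--
--     # decide the filled cells from the indexes, no outward grid scans
--     fill = set()
--     for r in range(min_r, max_r + 1):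
--         cs = rows_of.get(r, [])
--         left = max((c for c in cs if c <= seed_c), default=-1)
--         right = min((c for c in cs if c >= seed_c), default=w)
--         for c in range(left + 1, right):
--             if grid[r][c] != A:
--                 fill.add((r, c))
--     for c in range(min_c, max_c + 1):
--         rs = cols_of.get(c, [])
--         top = max((r for r in rs if r <= seed_r), default=-1)
--         bottom = min((r for r in rs if r >= seed_r), default=h)
--         for r in range(top + 1, bottom):
--             if grid[r][c] != A:
--                 fill.add((r, c))
--
--     return [[seed if (r, c) in fill else v for c, v in enumerate(row)]
--             for r, row in enumerate(grid)]
-- ===== Notes on version B (the rewrite author's own statement) =====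
-- stated objective: alternative
-- what changed: The classification (Counter max/min tie-breaking) is kept as-is, but A's four outward linear scans of the grid per row/column are replaced by lookups into two prebuilt indexes (dict row->A-columns, dict col->A-rows) whose max/min give the fill bounds; the fill region is collected into a set and the output grid is rebuilt in a single comprehension instead of being mutated in place.
import Mathlib
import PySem

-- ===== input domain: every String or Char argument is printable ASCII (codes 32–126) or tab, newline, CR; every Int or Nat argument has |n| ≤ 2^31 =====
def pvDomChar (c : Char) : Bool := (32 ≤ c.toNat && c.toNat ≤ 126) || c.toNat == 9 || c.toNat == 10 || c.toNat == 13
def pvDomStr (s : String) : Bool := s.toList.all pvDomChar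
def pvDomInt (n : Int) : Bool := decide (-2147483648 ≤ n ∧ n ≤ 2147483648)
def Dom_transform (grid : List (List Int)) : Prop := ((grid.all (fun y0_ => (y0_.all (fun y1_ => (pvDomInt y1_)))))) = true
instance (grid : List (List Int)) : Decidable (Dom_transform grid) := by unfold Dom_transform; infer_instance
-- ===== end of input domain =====

-- B replaces A's outward linear grid scans by per-row/per-column indexes of A-colored cells
-- (dicts row→A-columns / col→A-rows), computes the fill region from those indexes into a set,
-- and rebuilds the output in one comprehension; the classification prefix is deliberately kept
-- identical to A's and is shared below as `pvSetup`.

-- ===== PORT A =====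

/-- `grid[r][c]` for the in-range reads both Pythons perform (exact for `r < len grid`,
`c < len grid[r]`; `Pre_transform` guarantees every performed read/write is in range). -/
def pvCell (grid : List (List Int)) (r c : Nat) : Int := (grid.getD r []).getD c 0

structure PvSetup where
  seed : Int
  colA : Int
  apos : List (Nat × Nat)
  seedR : Nat
  seedC : Nat
  minR : Nat
  maxR : Nat
  minC : Nat
  maxC : Nat
deriving Repr, DecidableEq

/-- The counting loop both Pythons share verbatim: `cnt` (a Counter) and `coords`
(value → list of positions, row-major). Indices are the `Nat`s produced by `range(h)`/`range(w)`. -/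
def pvCounts (grid : List (List Int)) :
    PySem.Dict Int Int × PySem.Dict Int (List (Nat × Nat)) :=
  (List.range grid.length).foldl (fun st r =>
    (List.range (grid.headD []).length).foldl (fun st c =>
      let v := pvCell grid r c
      (st.1.insert v (st.1.getD v 0 + 1),
       st.2.insert v (st.2.getD v [] ++ [(r, c)]))) st)
    (PySem.Dict.empty, PySem.Dict.empty)

/-- The classification prefix both Pythons share verbatim (same Counter max/min tie-breaking):
`none` is any of the three early `return out`s (and the unreachable empty `coords[seed]`). -/
def pvSetup (grid : List (List Int)) : Option PvSetup :=
  let cnt := (pvCounts grid).1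
  let coords := (pvCounts grid).2
  match PySem.List.max? cnt.items (fun x => x.2) with
  | none => none                          -- `if not cnt: return out`
  | some bg =>
    let nonBg := cnt.keys.filter (fun v => v != bg.1)
    match PySem.List.min? nonBg (fun v => cnt.getD v 0) with
    | none => none                        -- `if not non_bg: return out`
    | some seedv =>
      let others := nonBg.filter (fun v => v != seedv)
      match PySem.List.max? others (fun v => cnt.getD v 0) with
      | none => none                      -- `if not others: return out`
      | some acol =>
        let apos := coords.getD acol []
        match (coords.getD seedv []).head? with
        | none => none                    -- unreachable: seed is a key of coords
        | some sp =>
          some { seed := seedv, colA := acol, apos := apos,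
                 seedR := sp.1, seedC := sp.2,
                 minR := (PySem.List.min? (apos.map (·.1)) (fun x => x)).getD 0,
                 maxR := (PySem.List.max? (apos.map (·.1)) (fun x => x)).getD 0,
                 minC := (PySem.List.min? (apos.map (·.2)) (fun x => x)).getD 0,
                 maxC := (PySem.List.max? (apos.map (·.2)) (fun x => x)).getD 0 }

/-- `out[r][c] = v` (in range on every write either Python performs). -/
def pvSet2 (out : List (List Int)) (r c : Nat) (v : Int) : List (List Int) :=
  out.modify r (fun row => row.set c v)

/-- A's `for c in range(start, -1, -1): if isA: left = c; break` over a line `cell`. -/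
def pvScanDown (cell : Nat → Int) (a : Int) (c : Nat) : Option Nat :=
  if cell c = a then some c
  else match c with
       | 0 => none
       | c' + 1 => pvScanDown cell a c'

/-- A's `for c in range(start, stop): if isA: right = c; break` over a line `cell`. -/
def pvScanUp (cell : Nat → Int) (a : Int) (c stop : Nat) : Option Nat :=
  if _h : c < stop then
    (if cell c = a then some c else pvScanUp cell a (c + 1) stop)
  else none
termination_by stop - c

/-- A's row-loop body: scan left/right from the seed column, fill the open interval
(`left = -1` / `left + 1` is rendered as `.elim 0 (· + 1)` on the optional hit). -/
def pvRowPass (grid : List (List Int)) (a seedv : Int) (seedC w : Nat)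
    (out : List (List Int)) (r : Nat) : List (List Int) :=
  let start := (pvScanDown (fun c => pvCell grid r c) a seedC).elim 0 (· + 1)
  let stop := (pvScanUp (fun c => pvCell grid r c) a seedC w).getD w
  (List.range' start (stop - start)).foldl
    (fun out c => if pvCell grid r c ≠ a then pvSet2 out r c seedv else out) out

/-- A's column-loop body (the symmetric scans). -/
def pvColPass (grid : List (List Int)) (a seedv : Int) (seedR h : Nat)
    (out : List (List Int)) (c : Nat) : List (List Int) :=
  let start := (pvScanDown (fun r => pvCell grid r c) a seedR).elim 0 (· + 1)
  let stop := (pvScanUp (fun r => pvCell grid r c) a seedR h).getD h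
  (List.range' start (stop - start)).foldl
    (fun out r => if pvCell grid r c ≠ a then pvSet2 out r c seedv else out) out

def transform (grid : List (List Int)) : List (List Int) :=
  match pvSetup grid with
  | none => grid        -- an early `return out`, `out` being an unmodified copy
  | some s =>
    let h := grid.length
    let w := (grid.headD []).length
    let out1 := (List.range' s.minR (s.maxR + 1 - s.minR)).foldl
      (pvRowPass grid s.colA s.seed s.seedC w) grid
    (List.range' s.minC (s.maxC + 1 - s.minC)).foldl
      (pvColPass grid s.colA s.seed s.seedR h) out1

-- ===== PORT B =====

/-- B's grouping loop: `d.setdefault(k(p), []).append(val(p))`. -/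
def pvGroup {α : Type} (l : List α) (k : α → Nat) (val : α → Nat) :
    PySem.Dict Nat (List Nat) :=
  l.foldl (fun d p => d.insert (k p) (d.getD (k p) [] ++ [val p])) PySem.Dict.empty

/-- B's row-loop body: bounds from the prebuilt row index
(`max(..., default=-1)` then `left + 1` is rendered as `.elim 0 (· + 1)`). -/
def pvRowMark (grid : List (List Int)) (a : Int) (seedC w : Nat)
    (rowsOf : PySem.Dict Nat (List Nat)) (f : PySem.Set (Nat × Nat)) (r : Nat) :
    PySem.Set (Nat × Nat) :=
  let cs := rowsOf.getD r []
  let start := (PySem.List.max? (cs.filter (fun c => c ≤ seedC)) (fun x => x)).elim 0 (· + 1)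
  let stop := (PySem.List.min? (cs.filter (fun c => seedC ≤ c)) (fun x => x)).getD w
  (List.range' start (stop - start)).foldl
    (fun f c => if pvCell grid r c ≠ a then PySem.Set.add f (r, c) else f) f

/-- B's column-loop body. -/
def pvColMark (grid : List (List Int)) (a : Int) (seedR h : Nat)
    (colsOf : PySem.Dict Nat (List Nat)) (f : PySem.Set (Nat × Nat)) (c : Nat) :
    PySem.Set (Nat × Nat) :=
  let rs := colsOf.getD c []
  let start := (PySem.List.max? (rs.filter (fun r => r ≤ seedR)) (fun x => x)).elim 0 (· + 1)
  let stop := (PySem.List.min? (rs.filter (fun r => seedR ≤ r)) (fun x => x)).getD h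
  (List.range' start (stop - start)).foldl
    (fun f r => if pvCell grid r c ≠ a then PySem.Set.add f (r, c) else f) f

def transform_alt (grid : List (List Int)) : List (List Int) :=
  match pvSetup grid with
  | none => grid
  | some s =>
    let h := grid.length
    let w := (grid.headD []).length
    let rowsOf := pvGroup s.apos (·.1) (·.2)
    let colsOf := pvGroup s.apos (·.2) (·.1)
    let fill1 := (List.range' s.minR (s.maxR + 1 - s.minR)).foldl
      (pvRowMark grid s.colA s.seedC w rowsOf) PySem.Set.empty
    let fill := (List.range' s.minC (s.maxC + 1 - s.minC)).foldl
      (pvColMark grid s.colA s.seedR h colsOf) fill1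
    grid.mapIdx (fun r row => row.mapIdx (fun c v =>
      if fill.contains (r, c) then s.seed else v))

-- ===== PRECONDITION & SPEC =====

-- Pre_ excludes exactly the ragged grids on which A raises IndexError: a row shorter than
-- row 0 is read at `grid[r][c]` for `c < len(grid[0])` by the counting loop.
def Pre_transform (grid : List (List Int)) : Prop :=
  ∀ row ∈ grid, (grid.headD []).length ≤ row.length

instance (grid : List (List Int)) : Decidable (Pre_transform grid) := by
  unfold Pre_transform; infer_instance

def pvWitness_transform : List (List Int) :=
  [[0, 0, 0, 0], [0, 3, 0, 2], [0, 0, 0, 0], [2, 0, 0, 2]]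

def Spec_transform (grid : List (List Int)) (out : List (List Int)) : Prop :=
  out = transform_alt grid

instance (grid : List (List Int)) (out : List (List Int)) :
    Decidable (Spec_transform grid out) := by unfold Spec_transform; infer_instance

-- ===== CLAIM =====

def Claim_equal_transform : Prop :=
  ∀ (grid : List (List Int)), Dom_transform grid → Pre_transform grid →
    Spec_transform grid (transform grid)


-- ===== LEMMAS AND PROOFS =====

-- Proof-only helpers --------------------------------------------------------

/-- The row-major list of all in-range cell positions. -/
def pvCellsL (grid : List (List Int)) : List (Nat × Nat) :=
  (List.range grid.length).flatMap (fun r =>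
    (List.range (grid.headD []).length).map ((r, ·)))

/-- The out[i][j] read used to compare both results pointwise. -/
def pvGet2 (g : List (List Int)) (i j : Nat) : Option Int :=
  (g[i]?).bind (fun row => row[j]?)

/-- A's row-scan bounds, named for the proofs. -/
def pvStartA (grid : List (List Int)) (a : Int) (seedC r : Nat) : Nat :=
  (pvScanDown (fun c => pvCell grid r c) a seedC).elim 0 (· + 1)
def pvStopA (grid : List (List Int)) (a : Int) (seedC w r : Nat) : Nat :=
  (pvScanUp (fun c => pvCell grid r c) a seedC w).getD w
def pvStartAC (grid : List (List Int)) (a : Int) (seedR c : Nat) : Nat :=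
  (pvScanDown (fun r => pvCell grid r c) a seedR).elim 0 (· + 1)
def pvStopAC (grid : List (List Int)) (a : Int) (seedR h c : Nat) : Nat :=
  (pvScanUp (fun r => pvCell grid r c) a seedR h).getD h

/-- B's index-lookup bounds, named for the proofs. -/
def pvStartB (rowsOf : PySem.Dict Nat (List Nat)) (seedC r : Nat) : Nat :=
  (PySem.List.max? ((rowsOf.getD r []).filter (fun c => c ≤ seedC)) (fun x => x)).elim 0 (· + 1)
def pvStopB (rowsOf : PySem.Dict Nat (List Nat)) (seedC w r : Nat) : Nat :=
  (PySem.List.min? ((rowsOf.getD r []).filter (fun c => seedC ≤ c)) (fun x => x)).getD w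

-- Generic list/dict lemmas ---------------------------------------------------

theorem pv_foldl2_flat {γ : Type} (R : List Nat) (C : Nat → List Nat)
    (f : γ → Nat × Nat → γ) (g : γ) :
    R.foldl (fun o r => (C r).foldl (fun o' c => f o' (r, c)) o) g
      = (R.flatMap (fun r => (C r).map ((r, ·)))).foldl f g := by
  induction R generalizing g <;> simp [List.foldl_append, List.foldl_map, *]

def pvStep1 (grid : List (List Int)) : PySem.Dict Int Int → (Nat × Nat) → PySem.Dict Int Int :=
  fun d p => d.insert (pvCell grid p.1 p.2) (d.getD (pvCell grid p.1 p.2) 0 + 1)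
def pvStep2 (grid : List (List Int)) :
    PySem.Dict Int (List (Nat × Nat)) → (Nat × Nat) → PySem.Dict Int (List (Nat × Nat)) :=
  fun d p => d.insert (pvCell grid p.1 p.2) (d.getD (pvCell grid p.1 p.2) [] ++ [p])

theorem pvCounts_eq (grid : List (List Int)) :
    pvCounts grid = ((pvCellsL grid).foldl (pvStep1 grid) PySem.Dict.empty,
                     (pvCellsL grid).foldl (pvStep2 grid) PySem.Dict.empty) := by
  have h1 : pvCounts grid
      = (pvCellsL grid).foldl (fun st p => (pvStep1 grid st.1 p, pvStep2 grid st.2 p))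
          (PySem.Dict.empty, PySem.Dict.empty) :=
    pv_foldl2_flat (List.range grid.length) (fun _ => List.range (grid.headD []).length)
      (fun st p => (pvStep1 grid st.1 p, pvStep2 grid st.2 p))
      (PySem.Dict.empty, PySem.Dict.empty)
  rw [h1]
  exact PySem.List.foldl_prod_mk (pvStep1 grid) (pvStep2 grid) (pvCellsL grid) _ _

theorem pv_foldl_group_getD {α κ ν : Type} [BEq κ] [LawfulBEq κ]
    (l : List α) (k : α → κ) (val : α → ν) (x : κ) :
    (l.foldl (fun d p => d.insert (k p) (d.getD (k p) [] ++ [val p])) PySem.Dict.empty).getD x []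
      = (l.filter (fun p => k p == x)).map val := by
  have h1 := PySem.Dict.getD_foldl_modify_append (l := l.map (fun p => (k p, val p)))
    (d := (PySem.Dict.empty : PySem.Dict κ (List ν))) (c := x)
  rw [List.foldl_map] at h1
  simp only [List.filter_map, List.map_map] at h1
  simpa using h1

-- Characterizations of the shared prefix ------------------------------------

theorem pv_mem_cellsL (grid : List (List Int)) (r c : Nat) :
    (r, c) ∈ pvCellsL grid ↔ r < grid.length ∧ c < (grid.headD []).length := by
  simp [pvCellsL]

theorem pv_coords_getD (grid : List (List Int)) (v : Int) :
    (pvCounts grid).2.getD v []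
      = (pvCellsL grid).filter (fun p => pvCell grid p.1 p.2 == v) := by
  rw [pvCounts_eq]
  have h := pv_foldl_group_getD (pvCellsL grid) (fun p => pvCell grid p.1 p.2)
    (fun p => p) v
  simpa using h

theorem pv_mem_coords (grid : List (List Int)) (v : Int) (r c : Nat) :
    (r, c) ∈ (pvCounts grid).2.getD v []
      ↔ r < grid.length ∧ c < (grid.headD []).length ∧ pvCell grid r c = v := by
  rw [pv_coords_getD, List.mem_filter, pv_mem_cellsL]
  simp; tauto

theorem pv_mem_keys_cnt (grid : List (List Int)) (v : Int) :
    v ∈ (pvCounts grid).1.keys ↔ ∃ p ∈ pvCellsL grid, pvCell grid p.1 p.2 = v := by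
  rw [pvCounts_eq]
  have h := PySem.Dict.keys_foldl_insert_key (pvCellsL grid)
    (fun p : Nat × Nat => pvCell grid p.1 p.2)
    (fun d p => d.getD (pvCell grid p.1 p.2) 0 + 1) (PySem.Dict.empty : PySem.Dict Int Int)
  rw [PySem.Dict.keys_empty, PySem.Set.update_nil_left] at h
  have h2 : ((pvCellsL grid).foldl (pvStep1 grid) PySem.Dict.empty).keys
      = PySem.Set.ofList ((pvCellsL grid).map (fun p : Nat × Nat => pvCell grid p.1 p.2)) := h
  rw [h2, PySem.Set.mem_ofList]
  simp

theorem pv_pvGroup_getD {α : Type} (l : List α) (k val : α → Nat) (x : Nat) :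
    (pvGroup l k val).getD x [] = (l.filter (fun p => k p == x)).map val :=
  pv_foldl_group_getD l k val x

-- Scan characterizations ------------------------------------------------------

theorem pvScanDown_eq_none_iff (cell : Nat → Int) (a : Int) (c0 : Nat) :
    pvScanDown cell a c0 = none ↔ ∀ c ≤ c0, cell c ≠ a := by
  induction c0 with
  | zero =>
      rw [pvScanDown]
      split_ifs with h
      · simp only [false_iff]; intro hall; exact hall 0 (le_refl 0) h
      · simp only [true_iff]; intro c hc; interval_cases c; exact h
  | succ n ih =>
      rw [pvScanDown]
      split_ifs with h
      · simp only [false_iff]; intro hall; exact hall (n+1) (le_refl _) h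
      · rw [ih]
        constructor
        · intro hall c hc
          rcases Nat.lt_or_ge c (n+1) with h1 | h1
          · exact hall c (by omega)
          · have : c = n + 1 := by omega
            subst this; exact h
        · intro hall c hc; exact hall c (by omega)

theorem pvScanDown_eq_some_iff (cell : Nat → Int) (a : Int) (c0 m : Nat) :
    pvScanDown cell a c0 = some m
      ↔ m ≤ c0 ∧ cell m = a ∧ ∀ c, m < c → c ≤ c0 → cell c ≠ a := by
  induction c0 with
  | zero =>
      rw [pvScanDown]
      split_ifs with h
      · simp only [Option.some.injEq]
        constructor
        · rintro rfl; exact ⟨le_refl _, h, fun c hc hc' => by omega⟩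
        · rintro ⟨h1, h2, h3⟩; omega
      · simp only [false_iff]
        rintro ⟨h1, h2, h3⟩
        interval_cases m; exact h h2
  | succ n ih =>
      rw [pvScanDown]
      split_ifs with h
      · simp only [Option.some.injEq]
        constructor
        · rintro rfl; exact ⟨le_refl _, h, fun c hc hc' => by omega⟩
        · rintro ⟨h1, h2, h3⟩
          by_contra hne
          exact h3 (n+1) (by omega) (le_refl _) h
      · rw [ih]
        constructor
        · rintro ⟨h1, h2, h3⟩
          refine ⟨by omega, h2, fun c hc hc' => ?_⟩
          rcases Nat.lt_or_ge c (n+1) with h4 | h4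
          · exact h3 c hc (by omega)
          · have : c = n + 1 := by omega
            subst this; exact h
        · rintro ⟨h1, h2, h3⟩
          have hm : m ≠ n + 1 := by rintro rfl; exact h h2
          exact ⟨by omega, h2, fun c hc hc' => h3 c hc (by omega)⟩

theorem pvScanUp_eq_none_iff (cell : Nat → Int) (a : Int) (c0 stop : Nat) :
    pvScanUp cell a c0 stop = none ↔ ∀ c, c0 ≤ c → c < stop → cell c ≠ a := by
  by_cases hlt : c0 < stop
  · rw [pvScanUp]
    simp only [hlt, dif_pos]
    split_ifs with h
    · simp only [false_iff]; intro hall; exact hall c0 (le_refl _) hlt h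
    · rw [pvScanUp_eq_none_iff cell a (c0+1) stop]
      constructor
      · intro hall c hc hc'
        rcases Nat.lt_or_ge c0 c with h1 | h1
        · exact hall c (by omega) hc'
        · have : c = c0 := by omega
          subst this; exact h
      · intro hall c hc hc'; exact hall c (by omega) hc'
  · rw [pvScanUp]
    simp only [hlt, dif_neg, not_false_iff, true_iff]
    intro c hc hc'; omega
termination_by stop - c0

theorem pvScanUp_eq_some_iff (cell : Nat → Int) (a : Int) (c0 stop m : Nat) :
    pvScanUp cell a c0 stop = some m
      ↔ c0 ≤ m ∧ m < stop ∧ cell m = a ∧ ∀ c, c0 ≤ c → c < m → cell c ≠ a := by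
  by_cases hlt : c0 < stop
  · rw [pvScanUp]
    simp only [hlt, dif_pos]
    split_ifs with h
    · simp only [Option.some.injEq]
      constructor
      · rintro rfl; exact ⟨le_refl _, hlt, h, fun c hc hc' => by omega⟩
      · rintro ⟨h1, h2, h3, h4⟩
        by_contra hne
        exact h4 c0 (le_refl _) (by omega) h
    · rw [pvScanUp_eq_some_iff cell a (c0+1) stop m]
      constructor
      · rintro ⟨h1, h2, h3, h4⟩
        refine ⟨by omega, h2, h3, fun c hc hc' => ?_⟩
        rcases Nat.lt_or_ge c0 c with h5 | h5
        · exact h4 c (by omega) hc'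
        · have : c = c0 := by omega
          subst this; exact h
      · rintro ⟨h1, h2, h3, h4⟩
        have hm : m ≠ c0 := by rintro rfl; exact h h3
        exact ⟨by omega, h2, h3, fun c hc hc' => h4 c (by omega) hc'⟩
  · rw [pvScanUp]
    simp only [hlt, dif_neg, not_false_iff, reduceCtorEq, false_iff]
    rintro ⟨h1, h2, h3, h4⟩; omega
termination_by stop - c0

-- Scan = index lookup ---------------------------------------------------------

theorem pv_scanDown_eq_max (cell : Nat → Int) (a : Int) (c0 w : Nat) (cs : List Nat)
    (hc0 : c0 < w) (hcs : ∀ c, c ∈ cs ↔ c < w ∧ cell c = a) :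
    pvScanDown cell a c0
      = PySem.List.max? (cs.filter (fun c => c ≤ c0)) (fun x => x) := by
  cases hmax : PySem.List.max? (cs.filter (fun c => c ≤ c0)) (fun x => x) with
  | none =>
      rw [PySem.List.max?_eq_none_iff] at hmax
      rw [pvScanDown_eq_none_iff]
      intro c hc hcell
      have hmem : c ∈ cs.filter (fun c => c ≤ c0) := by
        rw [List.mem_filter]
        exact ⟨(hcs c).2 ⟨by omega, hcell⟩, by simpa using hc⟩
      rw [hmax] at hmem; simp at hmem
  | some m =>
      have hmem := PySem.List.max?_mem hmax
      have hmaxle := PySem.List.max?_isMax hmax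
      rw [List.mem_filter] at hmem
      obtain ⟨hmcs, hmle⟩ := hmem
      have hmle : m ≤ c0 := by simpa using hmle
      obtain ⟨hmw, hma⟩ := (hcs m).1 hmcs
      rw [pvScanDown_eq_some_iff]
      refine ⟨hmle, hma, fun c hc hc' hcell => ?_⟩
      have : c ∈ cs.filter (fun c => c ≤ c0) := by
        rw [List.mem_filter]
        exact ⟨(hcs c).2 ⟨by omega, hcell⟩, by simpa using hc'⟩
      have := hmaxle c this
      simp at this; omega

theorem pv_scanUp_eq_min (cell : Nat → Int) (a : Int) (c0 w : Nat) (cs : List Nat)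
    (hcs : ∀ c, c ∈ cs ↔ c < w ∧ cell c = a) :
    pvScanUp cell a c0 w
      = PySem.List.min? (cs.filter (fun c => c0 ≤ c)) (fun x => x) := by
  cases hmin : PySem.List.min? (cs.filter (fun c => c0 ≤ c)) (fun x => x) with
  | none =>
      rw [PySem.List.min?_eq_none_iff] at hmin
      rw [pvScanUp_eq_none_iff]
      intro c hc hc' hcell
      have hmem : c ∈ cs.filter (fun c => c0 ≤ c) := by
        rw [List.mem_filter]
        exact ⟨(hcs c).2 ⟨hc', hcell⟩, by simpa using hc⟩
      rw [hmin] at hmem; simp at hmem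
  | some m =>
      have hmem := PySem.List.min?_mem hmin
      have hminle := PySem.List.min?_isMin hmin
      rw [List.mem_filter] at hmem
      obtain ⟨hmcs, hmge⟩ := hmem
      have hmge : c0 ≤ m := by simpa using hmge
      obtain ⟨hmw, hma⟩ := (hcs m).1 hmcs
      rw [pvScanUp_eq_some_iff]
      refine ⟨hmge, hmw, hma, fun c hc hc' hcell => ?_⟩
      have : c ∈ cs.filter (fun c => c0 ≤ c) := by
        rw [List.mem_filter]
        exact ⟨(hcs c).2 ⟨by omega, hcell⟩, by simpa using hc⟩
      have := hminle c this
      simp at this; omega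

-- Pointwise behaviour of A's write loops -------------------------------------

theorem pvGet2_set2 (g : List (List Int)) (r c : Nat) (v : Int) (i j : Nat) :
    pvGet2 (pvSet2 g r c v) i j
      = if i = r ∧ j = c then (pvGet2 g i j).map (fun _ => v) else pvGet2 g i j := by
  unfold pvGet2 pvSet2
  rw [List.getElem?_modify]
  by_cases hi : i = r
  · subst hi
    by_cases hj : j = c
    · subst hj
      cases hrow : g[i]? with
      | none => simp
      | some row =>
          simp only [if_true, Option.map_eq_map, Option.map_some, Option.bind_some, and_self]
          rw [List.getElem?_set]
          rw [if_pos rfl]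
          cases h : row[j]? with
          | none => simp only [List.getElem?_eq_none_iff] at h
                    rw [if_neg (by omega)]; rfl
          | some x => have hlen : j < row.length := by
                        by_contra hc
                        rw [List.getElem?_eq_none_iff.2 (by omega)] at h; cases h
                      rw [if_pos hlen]; simp
    · cases hrow : g[i]? with
      | none => simp [hj]
      | some row =>
          simp only [if_true, Option.map_eq_map, Option.map_some, Option.bind_some,
            hj, and_false, if_false]
          rw [List.getElem?_set_ne (by omega : c ≠ j)]
  · cases hrow : g[i]? with
    | none => simp [hi]
    | some row =>
        simp only [Option.map_eq_map, Option.map_some, Option.bind_some]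
        rw [if_neg (by omega : ¬ r = i), if_neg (by tauto)]

theorem pv_inner_row_get2 (grid : List (List Int)) (a sv : Int) (r : Nat)
    (Cs : List Nat) (out : List (List Int)) (i j : Nat) :
    pvGet2 (Cs.foldl (fun out c => if pvCell grid r c ≠ a then pvSet2 out r c sv else out) out) i j
      = if i = r ∧ j ∈ Cs ∧ pvCell grid i j ≠ a
        then (pvGet2 out i j).map (fun _ => sv) else pvGet2 out i j := by
  induction Cs generalizing out with
  | nil => simp
  | cons c rest ih =>
      simp only [List.foldl_cons]
      rw [ih]
      by_cases h1 : i = r <;> by_cases h2 : j = c <;>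
        by_cases h3 : pvCell grid i j ≠ a <;> by_cases h4 : j ∈ rest <;>
        by_cases h5 : pvCell grid r c ≠ a <;>
        simp_all [pvGet2_set2, List.mem_cons, Option.map_map, Function.comp_def]

theorem pv_inner_col_get2 (grid : List (List Int)) (a sv : Int) (c : Nat)
    (Rs : List Nat) (out : List (List Int)) (i j : Nat) :
    pvGet2 (Rs.foldl (fun out r => if pvCell grid r c ≠ a then pvSet2 out r c sv else out) out) i j
      = if j = c ∧ i ∈ Rs ∧ pvCell grid i j ≠ a
        then (pvGet2 out i j).map (fun _ => sv) else pvGet2 out i j := by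
  induction Rs generalizing out with
  | nil => simp
  | cons r rest ih =>
      simp only [List.foldl_cons]
      rw [ih]
      by_cases h1 : j = c <;> by_cases h2 : i = r <;>
        by_cases h3 : pvCell grid i j ≠ a <;> by_cases h4 : i ∈ rest <;>
        by_cases h5 : pvCell grid r c ≠ a <;>
        simp_all [pvGet2_set2, List.mem_cons, Option.map_map, Function.comp_def]

theorem pv_foldRow_get2 (grid : List (List Int)) (a sv : Int) (seedC w : Nat)
    (R : List Nat) (out : List (List Int)) (i j : Nat) :
    pvGet2 (R.foldl (pvRowPass grid a sv seedC w) out) i j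
      = if i ∈ R ∧ j ∈ List.range' (pvStartA grid a seedC i)
            (pvStopA grid a seedC w i - pvStartA grid a seedC i) ∧ pvCell grid i j ≠ a
        then (pvGet2 out i j).map (fun _ => sv) else pvGet2 out i j := by
  induction R generalizing out with
  | nil => simp
  | cons r rest ih =>
      simp only [List.foldl_cons]
      rw [ih]
      have hpass : ∀ o, pvGet2 (pvRowPass grid a sv seedC w o r) i j
          = if i = r ∧ j ∈ List.range' (pvStartA grid a seedC i)
                (pvStopA grid a seedC w i - pvStartA grid a seedC i) ∧ pvCell grid i j ≠ a
            then (pvGet2 o i j).map (fun _ => sv) else pvGet2 o i j := by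
        intro o
        unfold pvRowPass
        rw [pv_inner_row_get2]
        by_cases h1 : i = r
        · subst h1; rfl
        · rw [if_neg (by tauto), if_neg (by tauto)]
      by_cases h1 : i = r <;>
        by_cases h2 : j ∈ List.range' (pvStartA grid a seedC i)
            (pvStopA grid a seedC w i - pvStartA grid a seedC i) <;>
        by_cases h3 : pvCell grid i j ≠ a <;> by_cases h4 : i ∈ rest <;>
        simp_all [List.mem_cons, Option.map_map, Function.comp_def]

theorem pv_foldCol_get2 (grid : List (List Int)) (a sv : Int) (seedR h : Nat)
    (Cl : List Nat) (out : List (List Int)) (i j : Nat) :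
    pvGet2 (Cl.foldl (pvColPass grid a sv seedR h) out) i j
      = if j ∈ Cl ∧ i ∈ List.range' (pvStartAC grid a seedR j)
            (pvStopAC grid a seedR h j - pvStartAC grid a seedR j) ∧ pvCell grid i j ≠ a
        then (pvGet2 out i j).map (fun _ => sv) else pvGet2 out i j := by
  induction Cl generalizing out with
  | nil => simp
  | cons c rest ih =>
      simp only [List.foldl_cons]
      rw [ih]
      have hpass : ∀ o, pvGet2 (pvColPass grid a sv seedR h o c) i j
          = if j = c ∧ i ∈ List.range' (pvStartAC grid a seedR j)
                (pvStopAC grid a seedR h j - pvStartAC grid a seedR j) ∧ pvCell grid i j ≠ a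
            then (pvGet2 o i j).map (fun _ => sv) else pvGet2 o i j := by
        intro o
        unfold pvColPass
        rw [pv_inner_col_get2]
        by_cases h1 : j = c
        · subst h1; rfl
        · rw [if_neg (by tauto), if_neg (by tauto)]
      by_cases h1 : j = c <;>
        by_cases h2 : i ∈ List.range' (pvStartAC grid a seedR j)
            (pvStopAC grid a seedR h j - pvStartAC grid a seedR j) <;>
        by_cases h3 : pvCell grid i j ≠ a <;> by_cases h4 : j ∈ rest <;>
        simp_all [List.mem_cons, Option.map_map, Function.comp_def]

-- Shape preservation ----------------------------------------------------------

theorem pv_foldl_shape (upd : List (List Int) → Nat → List (List Int))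
    (h : ∀ o x, (upd o x).map (·.length) = o.map (·.length))
    (l : List Nat) (out : List (List Int)) :
    (l.foldl upd out).map (·.length) = out.map (·.length) := by
  induction l generalizing out with
  | nil => rfl
  | cons x xs ih => rw [List.foldl_cons, ih, h]

theorem pv_mem_group_fst (l : List (Nat × Nat)) (r c : Nat) :
    c ∈ (pvGroup l (·.1) (·.2)).getD r [] ↔ (r, c) ∈ l := by
  rw [pv_pvGroup_getD]
  simp only [List.mem_map, List.mem_filter, beq_iff_eq]
  constructor
  · rintro ⟨p, ⟨hp, h1⟩, h2⟩
    have : p = (r, c) := Prod.ext h1 h2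
    rwa [this] at hp
  · intro h; exact ⟨(r, c), ⟨h, rfl⟩, rfl⟩

theorem pv_mem_group_snd (l : List (Nat × Nat)) (r c : Nat) :
    r ∈ (pvGroup l (·.2) (·.1)).getD c [] ↔ (r, c) ∈ l := by
  rw [pv_pvGroup_getD]
  simp only [List.mem_map, List.mem_filter, beq_iff_eq]
  constructor
  · rintro ⟨p, ⟨hp, h1⟩, h2⟩
    have : p = (r, c) := Prod.ext h2 h1
    rwa [this] at hp
  · intro h; exact ⟨(r, c), ⟨h, rfl⟩, rfl⟩

theorem pvSet2_map_length (g : List (List Int)) (r c : Nat) (v : Int) :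
    (pvSet2 g r c v).map (·.length) = g.map (·.length) := by
  apply List.ext_getElem?
  intro i
  simp only [List.getElem?_map]
  unfold pvSet2
  rw [List.getElem?_modify]
  by_cases h : r = i <;> cases g[i]? <;> simp [h]

theorem pv_foldRow_shape (grid : List (List Int)) (a sv : Int) (seedC w : Nat)
    (R : List Nat) (out : List (List Int)) :
    (R.foldl (pvRowPass grid a sv seedC w) out).map (·.length) = out.map (·.length) := by
  refine pv_foldl_shape _ (fun o r => ?_) R out
  unfold pvRowPass
  refine pv_foldl_shape _ (fun o' c => ?_) _ o
  split_ifs with h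
  · exact pvSet2_map_length o' r c sv
  · rfl

theorem pv_foldCol_shape (grid : List (List Int)) (a sv : Int) (seedR h : Nat)
    (Cl : List Nat) (out : List (List Int)) :
    (Cl.foldl (pvColPass grid a sv seedR h) out).map (·.length) = out.map (·.length) := by
  refine pv_foldl_shape _ (fun o c => ?_) Cl out
  unfold pvColPass
  refine pv_foldl_shape _ (fun o' r => ?_) _ o
  split_ifs with hh
  · exact pvSet2_map_length o' r c sv
  · rfl

-- Membership in B's fill set --------------------------------------------------

theorem pv_inner_mark_mem (grid : List (List Int)) (a : Int) (r : Nat)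
    (Cs : List Nat) (f : PySem.Set (Nat × Nat)) (p : Nat × Nat) :
    p ∈ Cs.foldl (fun f c => if pvCell grid r c ≠ a then PySem.Set.add f (r, c) else f) f
      ↔ p ∈ f ∨ (p.1 = r ∧ p.2 ∈ Cs ∧ pvCell grid p.1 p.2 ≠ a) := by
  induction Cs generalizing f with
  | nil => simp
  | cons c rest ih =>
      rw [List.foldl_cons, ih]
      obtain ⟨pi, pj⟩ := p
      by_cases h5 : pvCell grid r c ≠ a
      · rw [if_pos h5]
        simp only [PySem.Set.mem_add, List.mem_cons, Prod.mk.injEq]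
        constructor
        · rintro (((h | ⟨rfl, rfl⟩) ) | h)
          · exact Or.inl h
          · exact Or.inr ⟨rfl, Or.inl rfl, h5⟩
          · exact Or.inr ⟨h.1, Or.inr h.2.1, h.2.2⟩
        · rintro (h | ⟨rfl, (rfl | hm), hc⟩)
          · exact Or.inl (Or.inl h)
          · exact Or.inl (Or.inr ⟨rfl, rfl⟩)
          · exact Or.inr ⟨rfl, hm, hc⟩
      · rw [if_neg h5]
        simp only [List.mem_cons]
        constructor
        · rintro (h | h)
          · exact Or.inl h
          · exact Or.inr ⟨h.1, Or.inr h.2.1, h.2.2⟩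
        · rintro (h | ⟨rfl, (rfl | hm), hc⟩)
          · exact Or.inl h
          · exact absurd hc h5
          · exact Or.inr ⟨rfl, hm, hc⟩

theorem pv_inner_markC_mem (grid : List (List Int)) (a : Int) (c : Nat)
    (Rs : List Nat) (f : PySem.Set (Nat × Nat)) (p : Nat × Nat) :
    p ∈ Rs.foldl (fun f r => if pvCell grid r c ≠ a then PySem.Set.add f (r, c) else f) f
      ↔ p ∈ f ∨ (p.2 = c ∧ p.1 ∈ Rs ∧ pvCell grid p.1 p.2 ≠ a) := by
  induction Rs generalizing f with
  | nil => simp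
  | cons r rest ih =>
      rw [List.foldl_cons, ih]
      obtain ⟨pi, pj⟩ := p
      by_cases h5 : pvCell grid r c ≠ a
      · rw [if_pos h5]
        simp only [PySem.Set.mem_add, List.mem_cons, Prod.mk.injEq]
        constructor
        · rintro (((h | ⟨rfl, rfl⟩) ) | h)
          · exact Or.inl h
          · exact Or.inr ⟨rfl, Or.inl rfl, h5⟩
          · exact Or.inr ⟨h.1, Or.inr h.2.1, h.2.2⟩
        · rintro (h | ⟨rfl, (rfl | hm), hc⟩)
          · exact Or.inl (Or.inl h)
          · exact Or.inl (Or.inr ⟨rfl, rfl⟩)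
          · exact Or.inr ⟨rfl, hm, hc⟩
      · rw [if_neg h5]
        simp only [List.mem_cons]
        constructor
        · rintro (h | h)
          · exact Or.inl h
          · exact Or.inr ⟨h.1, Or.inr h.2.1, h.2.2⟩
        · rintro (h | ⟨rfl, (rfl | hm), hc⟩)
          · exact Or.inl h
          · exact absurd hc h5
          · exact Or.inr ⟨rfl, hm, hc⟩

theorem pv_foldRowMark_mem (grid : List (List Int)) (a : Int) (seedC w : Nat)
    (rowsOf : PySem.Dict Nat (List Nat)) (R : List Nat)
    (f : PySem.Set (Nat × Nat)) (p : Nat × Nat) :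
    p ∈ R.foldl (pvRowMark grid a seedC w rowsOf) f
      ↔ p ∈ f ∨ (p.1 ∈ R ∧ p.2 ∈ List.range' (pvStartB rowsOf seedC p.1)
          (pvStopB rowsOf seedC w p.1 - pvStartB rowsOf seedC p.1) ∧ pvCell grid p.1 p.2 ≠ a) := by
  induction R generalizing f with
  | nil => simp
  | cons r rest ih =>
      rw [List.foldl_cons, ih]
      have hmark : ∀ ff, p ∈ pvRowMark grid a seedC w rowsOf ff r
          ↔ p ∈ ff ∨ (p.1 = r ∧ p.2 ∈ List.range' (pvStartB rowsOf seedC p.1)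
              (pvStopB rowsOf seedC w p.1 - pvStartB rowsOf seedC p.1) ∧ pvCell grid p.1 p.2 ≠ a) := by
        intro ff
        unfold pvRowMark
        rw [pv_inner_mark_mem]
        constructor
        · rintro (h | ⟨h1, h2, h3⟩)
          · exact Or.inl h
          · subst h1; exact Or.inr ⟨rfl, h2, h3⟩
        · rintro (h | ⟨h1, h2, h3⟩)
          · exact Or.inl h
          · subst h1; exact Or.inr ⟨rfl, h2, h3⟩
      rw [hmark]
      simp only [List.mem_cons]
      constructor
      · rintro (h | h)
        · rcases h with h | h
          · exact Or.inl h
          · exact Or.inr ⟨Or.inl h.1, h.2.1, h.2.2⟩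
        · exact Or.inr ⟨Or.inr h.1, h.2.1, h.2.2⟩
      · rintro (h | ⟨(h1 | h1), h2, h3⟩)
        · exact Or.inl (Or.inl h)
        · exact Or.inl (Or.inr ⟨h1, h2, h3⟩)
        · exact Or.inr ⟨h1, h2, h3⟩

theorem pv_foldColMark_mem (grid : List (List Int)) (a : Int) (seedR h : Nat)
    (colsOf : PySem.Dict Nat (List Nat)) (Cl : List Nat)
    (f : PySem.Set (Nat × Nat)) (p : Nat × Nat) :
    p ∈ Cl.foldl (pvColMark grid a seedR h colsOf) f
      ↔ p ∈ f ∨ (p.2 ∈ Cl ∧ p.1 ∈ List.range' (pvStartB colsOf seedR p.2)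
          (pvStopB colsOf seedR h p.2 - pvStartB colsOf seedR p.2) ∧ pvCell grid p.1 p.2 ≠ a) := by
  induction Cl generalizing f with
  | nil => simp
  | cons c rest ih =>
      rw [List.foldl_cons, ih]
      have hmark : ∀ ff, p ∈ pvColMark grid a seedR h colsOf ff c
          ↔ p ∈ ff ∨ (p.2 = c ∧ p.1 ∈ List.range' (pvStartB colsOf seedR p.2)
              (pvStopB colsOf seedR h p.2 - pvStartB colsOf seedR p.2) ∧ pvCell grid p.1 p.2 ≠ a) := by
        intro ff
        unfold pvColMark
        rw [pv_inner_markC_mem]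
        constructor
        · rintro (hx | ⟨h1, h2, h3⟩)
          · exact Or.inl hx
          · subst h1; exact Or.inr ⟨rfl, h2, h3⟩
        · rintro (hx | ⟨h1, h2, h3⟩)
          · exact Or.inl hx
          · subst h1; exact Or.inr ⟨rfl, h2, h3⟩
      rw [hmark]
      simp only [List.mem_cons]
      constructor
      · rintro (hx | hx)
        · rcases hx with hx | hx
          · exact Or.inl hx
          · exact Or.inr ⟨Or.inl hx.1, hx.2.1, hx.2.2⟩
        · exact Or.inr ⟨Or.inr hx.1, hx.2.1, hx.2.2⟩
      · rintro (hx | ⟨(h1 | h1), h2, h3⟩)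
        · exact Or.inl (Or.inl hx)
        · exact Or.inl (Or.inr ⟨h1, h2, h3⟩)
        · exact Or.inr ⟨h1, h2, h3⟩

-- ===== VERDICT =====

theorem transform_spec : Claim_equal_transform := by
  unfold Claim_equal_transform
  intro grid _hdom hpre
  unfold Spec_transform
  cases hs : pvSetup grid with
  | none => unfold transform transform_alt; rw [hs]
  | some s =>
      have hsetup := hs
      unfold pvSetup at hsetup
      simp only [] at hsetup
      split at hsetup
      next heq1 => exact absurd hsetup (by simp)
      next bg heq1 =>
        split at hsetup
        next heq2 => exact absurd hsetup (by simp)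
        next seedv heq2 =>
          split at hsetup
          next heq3 => exact absurd hsetup (by simp)
          next acol heq3 =>
            split at hsetup
            next heq4 => exact absurd hsetup (by simp)
            next sp heq4 =>
              rw [Option.some.injEq] at hsetup
              subst hsetup
              unfold transform transform_alt
              rw [hs]
              simp only []
              -- facts about the shared setup
              have hseedmem : (sp.1, sp.2) ∈ (pvCounts grid).2.getD seedv [] := by
                have h1 : sp ∈ (pvCounts grid).2.getD seedv [] := List.mem_of_mem_head? heq4
                simpa using h1
              obtain ⟨hspr, hspc, _hspv⟩ := (pv_mem_coords grid seedv sp.1 sp.2).1 hseedmem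
              have hmemA : ∀ r c : Nat, (r, c) ∈ (pvCounts grid).2.getD acol []
                  ↔ r < grid.length ∧ c < (grid.headD []).length ∧ pvCell grid r c = acol :=
                fun r c => pv_mem_coords grid acol r c
              have hacolkeys : acol ∈ (pvCounts grid).1.keys := by
                have h1 := PySem.List.max?_mem heq3
                exact (List.mem_filter.1 ((List.mem_filter.1 h1).1)).1
              have haposne : (pvCounts grid).2.getD acol [] ≠ [] := by
                obtain ⟨p, hp, hcell⟩ := (pv_mem_keys_cnt grid acol).1 hacolkeys
                have hc := (pv_mem_cellsL grid p.1 p.2).1 (by simpa using hp)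
                intro hnil
                have hm : (p.1, p.2) ∈ (pvCounts grid).2.getD acol [] :=
                  (hmemA p.1 p.2).2 ⟨hc.1, hc.2, hcell⟩
                rw [hnil] at hm; simp at hm
              set apos := (pvCounts grid).2.getD acol [] with hap
              set mR := (PySem.List.min? (apos.map fun x => x.1) fun x => x).getD 0 with hmRd
              set MR := (PySem.List.max? (apos.map fun x => x.1) fun x => x).getD 0 with hMRd
              set mC := (PySem.List.min? (apos.map fun x => x.2) fun x => x).getD 0 with hmCd
              set MC := (PySem.List.max? (apos.map fun x => x.2) fun x => x).getD 0 with hMCd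
              set Rrow := List.range' mR (MR + 1 - mR) with hRrowd
              set Rcol := List.range' mC (MC + 1 - mC) with hRcold
              have hRlt : ∀ r ∈ Rrow, r < grid.length := by
                intro r hr
                rw [hRrowd, List.mem_range'_1] at hr
                cases hM : PySem.List.max? (apos.map fun x => x.1) fun x => x with
                | none =>
                    rw [PySem.List.max?_eq_none_iff] at hM
                    simp only [List.map_eq_nil_iff] at hM
                    exact absurd hM haposne
                | some M =>
                    have hMmem := PySem.List.max?_mem hM
                    obtain ⟨p, hp, hpe⟩ := List.mem_map.1 hMmem
                    have hplt := ((hmemA p.1 p.2).1 (by simpa using hp)).1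
                    have hMRM : MR = M := by rw [hMRd, hM]; rfl
                    omega
              have hClt : ∀ c ∈ Rcol, c < (grid.headD []).length := by
                intro c hc
                rw [hRcold, List.mem_range'_1] at hc
                cases hM : PySem.List.max? (apos.map fun x => x.2) fun x => x with
                | none =>
                    rw [PySem.List.max?_eq_none_iff] at hM
                    simp only [List.map_eq_nil_iff] at hM
                    exact absurd hM haposne
                | some M =>
                    have hMmem := PySem.List.max?_mem hM
                    obtain ⟨p, hp, hpe⟩ := List.mem_map.1 hMmem
                    have hplt := ((hmemA p.1 p.2).1 (by simpa using hp)).2.1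
                    have hMCM : MC = M := by rw [hMCd, hM]; rfl
                    omega
              set rowsOf := pvGroup apos (fun x => x.1) (fun x => x.2) with hrowsOfd
              set colsOf := pvGroup apos (fun x => x.2) (fun x => x.1) with hcolsOfd
              have hcsrow : ∀ i, i < grid.length → ∀ c : Nat,
                  (c ∈ rowsOf.getD i []) ↔
                    c < (grid.headD []).length ∧ pvCell grid i c = acol := by
                intro i hi c
                rw [hrowsOfd, pv_mem_group_fst]
                rw [hmemA i c]
                constructor
                · rintro ⟨_, h2, h3⟩; exact ⟨h2, h3⟩
                · rintro ⟨h2, h3⟩; exact ⟨hi, h2, h3⟩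
              have hcscol : ∀ j, j < (grid.headD []).length → ∀ r : Nat,
                  (r ∈ colsOf.getD j []) ↔ r < grid.length ∧ pvCell grid r j = acol := by
                intro j hj r
                rw [hcolsOfd, pv_mem_group_snd]
                rw [hmemA r j]
                constructor
                · rintro ⟨h1, _, h3⟩; exact ⟨h1, h3⟩
                · rintro ⟨h1, h3⟩; exact ⟨h1, hj, h3⟩
              have hStartRow : ∀ i, i < grid.length →
                  pvStartA grid acol sp.2 i = pvStartB rowsOf sp.2 i := by
                intro i hi
                unfold pvStartA pvStartB
                rw [pv_scanDown_eq_max (fun c => pvCell grid i c) acol sp.2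
                  ((grid.headD []).length) _ hspc (hcsrow i hi)]
              have hStopRow : ∀ i, i < grid.length →
                  pvStopA grid acol sp.2 ((grid.headD []).length) i
                    = pvStopB rowsOf sp.2 ((grid.headD []).length) i := by
                intro i hi
                unfold pvStopA pvStopB
                rw [pv_scanUp_eq_min (fun c => pvCell grid i c) acol sp.2
                  ((grid.headD []).length) _ (hcsrow i hi)]
              have hStartCol : ∀ j, j < (grid.headD []).length →
                  pvStartAC grid acol sp.1 j = pvStartB colsOf sp.1 j := by
                intro j hj
                unfold pvStartAC pvStartB
                rw [pv_scanDown_eq_max (fun r => pvCell grid r j) acol sp.1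
                  grid.length _ hspr (hcscol j hj)]
              have hStopCol : ∀ j, j < (grid.headD []).length →
                  pvStopAC grid acol sp.1 grid.length j
                    = pvStopB colsOf sp.1 grid.length j := by
                intro j hj
                unfold pvStopAC pvStopB
                rw [pv_scanUp_eq_min (fun r => pvCell grid r j) acol sp.1
                  grid.length _ (hcscol j hj)]
              set fill := List.foldl (pvColMark grid acol sp.1 grid.length colsOf)
                  (List.foldl (pvRowMark grid acol sp.2 ((grid.headD []).length) rowsOf)
                    PySem.Set.empty Rrow) Rcol with hfilld
              set Ares := List.foldl (pvColPass grid acol seedv sp.1 grid.length)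
                  (List.foldl (pvRowPass grid acol seedv sp.2 ((grid.headD []).length)) grid Rrow)
                  Rcol with hAresd
              have hshape : Ares.map (·.length) = grid.map (·.length) := by
                rw [hAresd, pv_foldCol_shape, pv_foldRow_shape]
              have hlen : Ares.length = grid.length := by
                have h2 := congrArg List.length hshape; simpa using h2
              -- the two fill conditions agree pointwise
              have hfillmem : ∀ i j : Nat, ((i, j) ∈ fill
                  ↔ (j ∈ Rcol ∧ i ∈ List.range' (pvStartAC grid acol sp.1 j)
                        (pvStopAC grid acol sp.1 grid.length j - pvStartAC grid acol sp.1 j) ∧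
                        pvCell grid i j ≠ acol)
                    ∨ (i ∈ Rrow ∧ j ∈ List.range' (pvStartA grid acol sp.2 i)
                        (pvStopA grid acol sp.2 ((grid.headD []).length) i - pvStartA grid acol sp.2 i) ∧
                        pvCell grid i j ≠ acol)) := by
                intro i j
                rw [hfilld, pv_foldColMark_mem, pv_foldRowMark_mem]
                have hempty : ¬ ((i, j) ∈ (PySem.Set.empty : PySem.Set (Nat × Nat))) := by
                  simp [PySem.Set.empty]
                constructor
                · rintro ((hf | ⟨h1, h2, h3⟩) | ⟨h1, h2, h3⟩)
                  · exact absurd hf hempty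
                  · refine Or.inr ⟨h1, ?_, h3⟩
                    rwa [hStartRow i (hRlt i h1), hStopRow i (hRlt i h1)]
                  · refine Or.inl ⟨h1, ?_, h3⟩
                    rwa [hStartCol j (hClt j h1), hStopCol j (hClt j h1)]
                · rintro (⟨h1, h2, h3⟩ | ⟨h1, h2, h3⟩)
                  · refine Or.inr ⟨h1, ?_, h3⟩
                    rwa [← hStartCol j (hClt j h1), ← hStopCol j (hClt j h1)]
                  · refine Or.inl (Or.inr ⟨h1, ?_, h3⟩)
                    rwa [← hStartRow i (hRlt i h1), ← hStopRow i (hRlt i h1)]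
              have hget : ∀ i j : Nat, pvGet2 Ares i j
                  = if (i, j) ∈ fill then (pvGet2 grid i j).map (fun _ => seedv)
                    else pvGet2 grid i j := by
                intro i j
                rw [hAresd, pv_foldCol_get2, pv_foldRow_get2]
                rcases Decidable.em ((i, j) ∈ fill) with hfm | hfm
                · rw [if_pos hfm]
                  rcases (hfillmem i j).1 hfm with hc | hc
                  · rw [if_pos hc]
                    split_ifs with h2
                    · rw [Option.map_map]; rfl
                    · rfl
                  · rw [if_pos hc]
                    split_ifs with h2
                    · rw [Option.map_map]; rfl
                    · rfl
                · rw [if_neg hfm]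
                  have hnc := fun hc => hfm ((hfillmem i j).2 (Or.inl hc))
                  have hnr := fun hc => hfm ((hfillmem i j).2 (Or.inr hc))
                  rw [if_neg hnr, if_neg hnc]
              -- final extensionality
              apply List.ext_getElem?
              intro i
              rw [List.getElem?_mapIdx]
              by_cases hi : i < grid.length
              · rw [List.getElem?_eq_getElem (show i < Ares.length by omega),
                    List.getElem?_eq_getElem hi]
                simp only [Option.map_some, Option.some.injEq]
                apply List.ext_getElem?
                intro j
                have hA2 : (Ares[i]'(by omega))[j]? = pvGet2 Ares i j := by
                  rw [pvGet2, List.getElem?_eq_getElem (show i < Ares.length by omega)]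
                  rfl
                have hG2 : (grid[i]'hi)[j]? = pvGet2 grid i j := by
                  rw [pvGet2, List.getElem?_eq_getElem hi]
                  rfl
                rw [hA2, List.getElem?_mapIdx, hget i j]
                have hcont : (fill.contains (i, j) = true) ↔ (i, j) ∈ fill :=
                  PySem.Set.contains_iff fill (i, j)
                rcases Decidable.em ((i, j) ∈ fill) with hfm | hfm
                · rw [if_pos hfm]
                  cases ho : pvGet2 grid i j with
                  | none =>
                      rw [← hG2] at ho
                      simp only [ho, Option.map_none]
                  | some x =>
                      rw [← hG2] at ho
                      simp only [ho, Option.map_some]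
                      simp [hfm]
                · rw [if_neg hfm]
                  cases ho : pvGet2 grid i j with
                  | none =>
                      rw [← hG2] at ho
                      simp only [ho, Option.map_none]
                  | some x =>
                      rw [← hG2] at ho
                      simp only [ho, Option.map_some]
                      have hcf : fill.contains (i, j) = false := by
                        rcases Bool.eq_false_or_eq_true (fill.contains (i, j)) with hb | hb
                        · exact absurd (hcont.1 hb) hfm
                        · exact hb
                      simp only [hcf, Bool.false_eq_true, if_false]
              · rw [List.getElem?_eq_none (by omega),
                    List.getElem?_eq_none (show grid.length ≤ i by omega)]
                rfl
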